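-- pv_equiv track=rewrite | github.com/MariuszKusio/roblox-studio-checker-bot | parser.py | amd_cpu_profile
-- ===== SOURCE A (Python) =====
-- def amd_cpu_profile(text: str):
--     """
--     Określa profil CPU + zintegrowanej grafiki dla AMD
--     """
--     t = text.lower()
--
--     # Ryzen (Vega iGPU)
--     if "ryzen" in t:
--         if "ryzen 3" in t:
--             return "igpu_limited"
--         return "igpu_ok"
--
--     # Starsze APU
--     if any(x in t for x in ["a4-", "a6-", "a8-", "a10-"]):
--         return "igpu_limited"
--
--     # FX – brak iGPU
--     if "fx-" in t:
--         return "unknown"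
--
--     return "unknown"
-- ===== SOURCE B (Python) =====
-- RULES = [
--     ("ryzen 3", "igpu_limited"),
--     ("ryzen", "igpu_ok"),
--     ("a4-", "igpu_limited"),
--     ("a6-", "igpu_limited"),
--     ("a8-", "igpu_limited"),
--     ("a10-", "igpu_limited"),
-- ]
--
--
-- def amd_cpu_profile(text: str):
--     t = text.lower()
--     for sub, label in RULES:
--         if sub in t:
--             return label
--     return "unknown"
-- ===== Notes on version B (the rewrite author's own statement) =====
-- stated objective: simpler
-- what changed: Replaces the nested if/return chain with an ordered (substring, label) rule table scanned by a single loop; the FX branch, which returned the default anyway, is dropped.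
import Mathlib
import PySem

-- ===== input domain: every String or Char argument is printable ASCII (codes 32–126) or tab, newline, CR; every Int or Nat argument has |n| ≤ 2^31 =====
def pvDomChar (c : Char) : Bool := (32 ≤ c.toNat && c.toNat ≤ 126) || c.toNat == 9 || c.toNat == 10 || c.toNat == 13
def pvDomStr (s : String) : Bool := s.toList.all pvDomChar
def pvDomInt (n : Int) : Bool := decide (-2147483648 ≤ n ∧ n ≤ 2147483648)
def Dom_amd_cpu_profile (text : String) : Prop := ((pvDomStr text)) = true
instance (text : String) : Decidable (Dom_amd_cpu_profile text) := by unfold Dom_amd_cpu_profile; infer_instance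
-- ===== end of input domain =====

-- B replaces A's nested if/return chain by an ordered (substring, label) rule table scanned by one loop (objective: simpler).

-- ===== PORT A =====
def amd_cpu_profile (text : String) : String :=
  let t := PySem.Str.lower text
  if PySem.Str.isIn "ryzen" t then
    if PySem.Str.isIn "ryzen 3" t then "igpu_limited" else "igpu_ok"
  else if ["a4-", "a6-", "a8-", "a10-"].any (fun x => PySem.Str.isIn x t) then
    "igpu_limited"
  else if PySem.Str.isIn "fx-" t then
    "unknown"
  else
    "unknown"

-- ===== PORT B =====
def amdRules : List (String × String) :=
  [("ryzen 3", "igpu_limited"), ("ryzen", "igpu_ok"), ("a4-", "igpu_limited"),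
   ("a6-", "igpu_limited"), ("a8-", "igpu_limited"), ("a10-", "igpu_limited")]

def amdFirstMatch (t : String) : List (String × String) → String
  | [] => "unknown"
  | (sub, label) :: rest => if PySem.Str.isIn sub t then label else amdFirstMatch t rest

def amd_cpu_profile_alt (text : String) : String :=
  amdFirstMatch (PySem.Str.lower text) amdRules

-- ===== PRECONDITION & SPEC =====
def Spec_amd_cpu_profile (text : String) (out : String) : Prop := out = amd_cpu_profile_alt text
instance (text : String) (out : String) : Decidable (Spec_amd_cpu_profile text out) := by unfold Spec_amd_cpu_profile; infer_instance

-- ===== CLAIM (what is proved, stated in full; the proofs are below) =====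
def Claim_equal_amd_cpu_profile : Prop := ∀ (text : String), Dom_amd_cpu_profile text → Spec_amd_cpu_profile text (amd_cpu_profile text)

-- ===== LEMMAS AND PROOFS =====

-- ===== VERDICT (by name: the statement is the Claim_ definition above) =====
theorem amd_cpu_profile_spec : Claim_equal_amd_cpu_profile := by
  intro text _
  unfold Spec_amd_cpu_profile amd_cpu_profile amd_cpu_profile_alt amdRules
  simp only [amdFirstMatch, PySem.Str.isIn, PySem.Str.toList_lower, List.any_cons,
    List.any_nil, Bool.or_eq_true, Bool.or_false]
  generalize (PySem.Chars.lower text.toList) = c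
  by_cases h3 : PySem.Chars.isIn "ryzen 3".toList c = true
  · have hr : PySem.Chars.isIn "ryzen".toList c = true := by
      rw [PySem.Chars.isIn_iff_infix] at h3 ⊢
      exact List.IsInfix.trans (by decide) h3
    simp only [h3, hr, if_true]
  · by_cases hr : PySem.Chars.isIn "ryzen".toList c = true <;>
      simp only [h3, hr, if_true, if_false, Bool.false_eq_true] <;> split_ifs <;> simp_all
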